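-- pv_equiv track=rewrite | github.com/paiv/aoc2016 | code/24-1-spelunking/solve.py | parse_problem
-- ===== SOURCE A (Python) =====
-- def pos_for_value(x, board):
--     w, h = len(board[0]), len(board)
--
--     for row in range(0, h):
--         for col in range(0, w):
--             if board[row][col] == x:
--                 return (col, row)
--     return None
--
-- def parse_board(text):
--     return [list(line) for line in text.splitlines()]
--
-- def parse_problem(problem):
--     board = parse_board(problem)
--     start = pos_for_value('0', board)
--     pois = []
--
--     for i in range(1, 10):
--         pos = pos_for_value(str(i), board)
--         if pos:
--             pois.append(pos)
--
--     clear = set(list('.0123456789'))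
--     clear_board = [[' ' if x in clear else x for x in line] for line in board]
--
--     return (start, pois, clear_board)
-- ===== SOURCE B (Python) =====
-- def parse_problem(problem):
--     positions = {}
--     clear_board = []
--     for row, line in enumerate(problem.splitlines()):
--         out = []
--         for col, ch in enumerate(line):
--             if ch in '0123456789' and ch not in positions:
--                 positions[ch] = (col, row)
--             out.append(' ' if ch in '.0123456789' else ch)
--         clear_board.append(out)
--     start = positions.get('0')
--     pois = [positions[d] for d in '123456789' if d in positions]
--     return (start, pois, clear_board)
-- ===== Notes on version B (the rewrite author's own statement) =====
-- stated objective: faster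
-- what changed: A scans the whole board once per digit (10 full row-major scans via pos_for_value) and clears the board in a separate pass; B makes a single pass over the board, recording each digit's first position in a dict (no overwrite) and building the cleared board as it goes.
import Mathlib
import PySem

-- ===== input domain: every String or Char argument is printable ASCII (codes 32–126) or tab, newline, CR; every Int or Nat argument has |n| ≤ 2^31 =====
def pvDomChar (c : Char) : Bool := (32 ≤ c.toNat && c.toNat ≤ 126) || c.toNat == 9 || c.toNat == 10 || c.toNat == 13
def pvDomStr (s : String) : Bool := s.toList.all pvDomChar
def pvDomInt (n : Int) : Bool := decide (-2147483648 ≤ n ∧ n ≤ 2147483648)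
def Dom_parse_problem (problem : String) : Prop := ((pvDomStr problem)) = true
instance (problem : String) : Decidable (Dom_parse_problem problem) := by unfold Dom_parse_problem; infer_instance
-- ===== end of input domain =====

-- B replaces A's ten full-board scans (one per digit) by a single pass that records each
-- digit's first position in a dict and clears the board as it goes (objective: faster).

-- ===== PORT A =====
def pos_for_value (x : String) (board : List (List String)) : Option (Int × Int) :=
  let w : Int := (((PySem.List.pyGet? board 0).getD []).length : Int)
  let h : Int := (board.length : Int)
  (PySem.List.pyRange 0 h 1).foldl (fun acc row =>
      match acc with
      | some r => some r
      | none =>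
        (PySem.List.pyRange 0 w 1).foldl (fun acc2 col =>
            match acc2 with
            | some r => some r
            | none =>
              match PySem.List.pyGet? board row with
              | none => none  -- Python raises IndexError here; excluded by Pre_
              | some line =>
                match PySem.List.pyGet? line col with
                | none => none  -- Python raises IndexError here; excluded by Pre_
                | some c => if c = x then some (col, row) else none) none) none

def parse_board (text : String) : List (List String) :=
  (PySem.Str.splitlines text).map (fun line => line.toList.map (fun c => String.ofList [c]))

def parse_problem (problem : String) : (Option (Int × Int)) × (List (Int × Int)) × List (List String) :=
  let board := parse_board problem
  let start := pos_for_value "0" board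
  let pois := (PySem.List.pyRange 1 10 1).foldl (fun acc i =>
      match pos_for_value (PySem.Int.toStr i) board with
      | some pos => acc ++ [pos]
      | none => acc) []
  let clear := PySem.Set.ofList (".0123456789".toList.map (fun c => String.ofList [c]))
  let clear_board := board.map (fun line => line.map (fun x => if PySem.Set.contains clear x then " " else x))
  (start, pois, clear_board)

-- ===== PORT B =====
def parse_problem_alt (problem : String) : (Option (Int × Int)) × (List (Int × Int)) × List (List String) :=
  let step := (PySem.List.enumerate (PySem.Str.splitlines problem) 0).foldl
    (fun (st : PySem.Dict Char (Int × Int) × List (List String)) rl =>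
      let inner := (PySem.List.enumerate rl.2.toList 0).foldl
        (fun (st2 : PySem.Dict Char (Int × Int) × List String) cc =>
          (if cc.2 ∈ "0123456789".toList ∧ ¬ (st2.1.contains cc.2) then
              st2.1.insert cc.2 (cc.1, rl.1)
            else st2.1,
           st2.2 ++ [if cc.2 ∈ ".0123456789".toList then " " else String.ofList [cc.2]]))
        (st.1, [])
      (inner.1, st.2 ++ [inner.2]))
    (PySem.Dict.empty, [])
  let positions := step.1
  let start := positions.get? '0'
  let pois := ("123456789".toList).foldl (fun acc d =>
      match positions.get? d with
      | some p => acc ++ [p]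
      | none => acc) []
  (start, pois, step.2)

-- ===== PRECONDITION & SPEC =====
-- Pre_ excludes the empty input (no lines: A's len(board[0]) raises IndexError) and ragged
-- boards (lines of unequal length), on which A either raises IndexError or silently never
-- scans columns beyond the first line's width.
def Pre_parse_problem (problem : String) : Prop :=
  PySem.Str.splitlines problem ≠ [] ∧
  ∀ s ∈ PySem.Str.splitlines problem,
    s.toList.length = ((PySem.Str.splitlines problem).headD "").toList.length
instance (problem : String) : Decidable (Pre_parse_problem problem) := by
  unfold Pre_parse_problem; infer_instance

def pvWitness_parse_problem : String := "0.#\n.1."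

def Spec_parse_problem (problem : String) (out : (Option (Int × Int)) × (List (Int × Int)) × List (List String)) : Prop := out = parse_problem_alt problem
instance (problem : String) (out : (Option (Int × Int)) × (List (Int × Int)) × List (List String)) : Decidable (Spec_parse_problem problem out) := by unfold Spec_parse_problem; infer_instance

-- ===== CLAIM (what is proved, stated in full; the proofs are below) =====
def Claim_equal_parse_problem : Prop := ∀ (problem : String), Dom_parse_problem problem → Pre_parse_problem problem → Spec_parse_problem problem (parse_problem problem)

-- ===== LEMMAS AND PROOFS =====

-- first-some search with an index counter (proof-side normal form)
def pvFindIdx {α β : Type} (g : Int → α → Option β) : List α → Int → Option β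
  | [], _ => none
  | x :: t, i =>
    match g i x with
    | some b => some b
    | none => pvFindIdx g t (i + 1)

-- row-major first position of character d on the board L
def pvPos (d : Char) (L : List String) : Option (Int × Int) :=
  pvFindIdx (fun r line =>
    pvFindIdx (fun c ch => if ch = d then some (c, r) else none) line.toList 0) L 0

-- an early-return loop (fold that keeps a `some` accumulator) is a first-some search
theorem pvFoldFirst {β : Type} (f2 : Option β → Int → Option β) (f : Int → Option β) (l : List Int)
    (hsome : ∀ b i, f2 (some b) i = some b) (hnone : ∀ i, f2 none i = f i) :
    l.foldl f2 none = l.findSome? f := by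
  suffices h : ∀ a : Option β, l.foldl f2 a = match a with | some r => some r | none => l.findSome? f by
    exact (h none).trans rfl
  induction l with
  | nil => intro a; cases a <;> simp
  | cons x t ih =>
    intro a
    cases a with
    | some r => simp only [List.foldl_cons, hsome]; exact (ih (some r)).trans rfl
    | none =>
      simp only [List.foldl_cons, hnone, List.findSome?_cons]
      rw [ih (f x)]
      cases f x <;> simp

-- a first-some search over range(len(xs)) that indexes xs is pvFindIdx
theorem pvFindSomeRange {α β : Type} (g : Int → α → Option β) (pre xs : List α)
    (F : Int → Option β)
    (hF : ∀ i v, PySem.List.pyGet? (pre ++ xs) i = some v → F i = g i v) :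
    (PySem.List.pyRange (pre.length : Int) ((pre.length : Int) + (xs.length : Int)) 1).findSome? F
      = pvFindIdx g xs (pre.length : Int) := by
  induction xs generalizing pre with
  | nil => simp [PySem.List.pyRange_one_eq_nil, pvFindIdx]
  | cons x t ih =>
    rw [PySem.List.pyRange_one_cons (by simp only [List.length_cons]; push_cast; omega)]
    rw [List.findSome?_cons]
    rw [hF (pre.length : Int) x (PySem.List.pyGet?_append_length pre t x)]
    unfold pvFindIdx
    cases g (pre.length : Int) x with
    | some b => simp
    | none =>
      simp only
      have h1 : ((pre.length : Int) + 1) = ((pre ++ [x]).length : Int) := by simp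
      have h2 : ((pre.length : Int) + ((x :: t).length : Int)) = ((pre ++ [x]).length : Int) + (t.length : Int) := by
        simp; omega
      rw [h1, h2]
      exact ih (pre ++ [x]) (fun i v hv => hF i v (by simpa using hv))

theorem pvFindSomeRange0 {α β : Type} (g : Int → α → Option β) (xs : List α)
    (F : Int → Option β)
    (hF : ∀ i v, PySem.List.pyGet? xs i = some v → F i = g i v) :
    (PySem.List.pyRange 0 (xs.length : Int) 1).findSome? F = pvFindIdx g xs 0 := by
  have := pvFindSomeRange g [] xs F (by simpa using hF)
  simpa using this

theorem pvFindIdx_congr {α β : Type} {g g' : Int → α → Option β} (xs : List α) (i : Int)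
    (h : ∀ a ∈ xs, ∀ j : Int, g j a = g' j a) :
    pvFindIdx g xs i = pvFindIdx g' xs i := by
  induction xs generalizing i with
  | nil => rfl
  | cons x t ih =>
    unfold pvFindIdx
    rw [h x (by simp) i]
    cases g' i x with
    | some b => rfl
    | none => simp only; exact ih (i + 1) (fun a ha j => h a (List.mem_cons_of_mem x ha) j)

theorem pvFindIdx_map {α γ β : Type} (g : Int → γ → Option β) (f : α → γ) (xs : List α) (i : Int) :
    pvFindIdx g (xs.map f) i = pvFindIdx (fun j a => g j (f a)) xs i := by
  induction xs generalizing i with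
  | nil => rfl
  | cons x t ih =>
    unfold pvFindIdx
    simp only [List.map_cons]
    cases g i (f x) <;> simp_all

theorem pvFindSome_enumerate {α β : Type} (g : Int → α → Option β) (xs : List α) (s : Int) :
    (PySem.List.enumerate xs s).findSome? (fun p => g p.1 p.2) = pvFindIdx g xs s := by
  induction xs generalizing s with
  | nil => simp [PySem.List.enumerate_nil, pvFindIdx]
  | cons x t ih =>
    rw [PySem.List.enumerate_cons, List.findSome?_cons]
    unfold pvFindIdx
    cases g s x <;> simp_all

theorem pvMapEnumClear (cs : List Char) (s : Int) :
    (PySem.List.enumerate cs s).map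
        (fun cc => if cc.2 ∈ ".0123456789".toList then (" " : String) else String.ofList [cc.2])
      = cs.map (fun ch => if ch ∈ ".0123456789".toList then " " else String.ofList [ch]) := by
  induction cs generalizing s with
  | nil => simp [PySem.List.enumerate_nil]
  | cons x t ih => rw [PySem.List.enumerate_cons]; simp only [List.map_cons, ih]

theorem pvMapEnumRows (L : List String) (s : Int) :
    (PySem.List.enumerate L s).map (fun rl =>
        rl.2.toList.map (fun ch => if ch ∈ ".0123456789".toList then (" " : String) else String.ofList [ch]))
      = L.map (fun line =>
          line.toList.map (fun ch => if ch ∈ ".0123456789".toList then " " else String.ofList [ch])) := by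
  induction L generalizing s with
  | nil => simp [PySem.List.enumerate_nil]
  | cons x t ih => rw [PySem.List.enumerate_cons]; simp only [List.map_cons, ih]

-- ===== A-side characterisation =====
theorem pvPosA (L : List String) (x : String) (d : Char) (hx : x = String.ofList [d])
    (hL : L ≠ []) (hrect : ∀ s ∈ L, s.toList.length = ((L.headD "").toList.length)) :
    pos_for_value x (L.map (fun line => line.toList.map (fun c => String.ofList [c])))
      = pvPos d L := by
  subst hx
  obtain ⟨l, ls, rfl⟩ : ∃ l ls, L = l :: ls := by
    cases L with
    | nil => exact absurd rfl hL
    | cons l ls => exact ⟨l, ls, rfl⟩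
  simp only [pos_for_value, List.map_cons, PySem.List.pyGet?_zero_cons, Option.getD_some]
  set f : String → List String := fun line => line.toList.map (fun c => String.ofList [c]) with hf
  set board : List (List String) := f l :: ls.map f with hboard
  have hwl : ∀ line ∈ board, (line.length : Int) = ((f l).length : Int) := by
    intro line hline
    have hmem : ∃ s ∈ l :: ls, f s = line := by
      have hb : board = (l :: ls).map f := by simp [hboard]
      rw [hb] at hline
      exact List.mem_map.mp hline
    obtain ⟨s, hs, rfl⟩ := hmem
    simp [hf, hrect s hs]
  rw [pvFoldFirst _
      (fun row => match PySem.List.pyGet? board row with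
        | none => none
        | some line =>
          pvFindIdx (fun col c => if c = String.ofList [d] then some (col, row) else none) line 0)
      _ (fun b i => rfl) ?hnone]
  case hnone =>
    intro row
    simp only
    cases hget : PySem.List.pyGet? board row with
    | none =>
      rw [pvFoldFirst _ (fun _ => (none : Option (Int × Int))) _ (fun b i => rfl) (fun i => rfl)]
      induction PySem.List.pyRange 0 ((f l).length : Int) 1 with
      | nil => rfl
      | cons y t iht => rw [List.findSome?_cons]; exact iht
    | some line =>
      have hlen : ((f l).length : Int) = (line.length : Int) :=
        (hwl line (PySem.List.mem_of_pyGet?_eq_some board hget)).symm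
      rw [pvFoldFirst _
          (fun col => match PySem.List.pyGet? line col with
            | none => none
            | some c => if c = String.ofList [d] then some (col, row) else none)
          _ (fun b i => rfl) (fun i => rfl)]
      rw [hlen]
      exact pvFindSomeRange0
        (fun col c => if c = String.ofList [d] then some (col, row) else none) line _
        (fun i v hv => by simp only [hv])
  · rw [pvFindSomeRange0
        (fun row line =>
          pvFindIdx (fun col c => if c = String.ofList [d] then some (col, row) else none) line 0)
        board _ (fun i v hv => by simp only [hv])]
    rw [show board = (l :: ls).map f from by simp [hboard]]
    rw [pvFindIdx_map]
    unfold pvPos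
    apply pvFindIdx_congr
    intro line _ r
    simp only [hf]
    rw [pvFindIdx_map]
    apply pvFindIdx_congr
    intro ch _ c
    by_cases h : ch = d
    · simp [h]
    · have hne' : ¬ (String.ofList [ch] = String.ofList [d]) := by
        simpa [String.ext_iff] using h
      simp [h, hne']

-- ===== B-side characterisation =====
def pvDictStep (row : Int) (D : PySem.Dict Char (Int × Int)) (cells : List (Int × Char)) :
    PySem.Dict Char (Int × Int) :=
  cells.foldl (fun d cc =>
    if cc.2 ∈ "0123456789".toList ∧ ¬ d.contains cc.2 then d.insert cc.2 (cc.1, row) else d) D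

theorem pvInnerSplit (row : Int) (cells : List (Int × Char))
    (D : PySem.Dict Char (Int × Int)) (out : List String) :
    cells.foldl (fun (st2 : PySem.Dict Char (Int × Int) × List String) cc =>
        (if cc.2 ∈ "0123456789".toList ∧ ¬ (st2.1.contains cc.2) then
            st2.1.insert cc.2 (cc.1, row)
          else st2.1,
         st2.2 ++ [if cc.2 ∈ ".0123456789".toList then " " else String.ofList [cc.2]])) (D, out)
      = (pvDictStep row D cells,
         out ++ cells.map (fun cc => if cc.2 ∈ ".0123456789".toList then " " else String.ofList [cc.2])) := by
  induction cells generalizing D out with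
  | nil => simp [pvDictStep]
  | cons c t ih =>
    simp only [List.foldl_cons, List.map_cons, pvDictStep] at *
    rw [ih]
    simp

theorem pvOuterSplit (l : List (Int × String))
    (D : PySem.Dict Char (Int × Int)) (rows : List (List String)) :
    l.foldl (fun (st : PySem.Dict Char (Int × Int) × List (List String)) rl =>
        let inner := (PySem.List.enumerate rl.2.toList 0).foldl
          (fun (st2 : PySem.Dict Char (Int × Int) × List String) cc =>
            (if cc.2 ∈ "0123456789".toList ∧ ¬ (st2.1.contains cc.2) then
                st2.1.insert cc.2 (cc.1, rl.1)
              else st2.1,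
             st2.2 ++ [if cc.2 ∈ ".0123456789".toList then " " else String.ofList [cc.2]]))
          (st.1, [])
        (inner.1, st.2 ++ [inner.2])) (D, rows)
      = (l.foldl (fun D rl => pvDictStep rl.1 D (PySem.List.enumerate rl.2.toList 0)) D,
         rows ++ l.map (fun rl =>
           rl.2.toList.map (fun ch => if ch ∈ ".0123456789".toList then " " else String.ofList [ch]))) := by
  induction l generalizing D rows with
  | nil => simp
  | cons rl t ih =>
    simp only [List.foldl_cons, List.map_cons]
    rw [pvInnerSplit]
    simp only [List.nil_append]
    rw [ih]
    rw [pvMapEnumClear]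
    simp

theorem pvGetStep (row : Int) (cells : List (Int × Char)) (D : PySem.Dict Char (Int × Int))
    (k : Char) (hk : k ∈ "0123456789".toList) :
    (pvDictStep row D cells).get? k
      = (match D.get? k with
         | some v => some v
         | none => cells.findSome? (fun cc => if cc.2 = k then some (cc.1, row) else none)) := by
  induction cells generalizing D with
  | nil =>
    unfold pvDictStep
    simp only [List.foldl_nil, List.findSome?_nil]
    cases D.get? k <;> rfl
  | cons c t ih =>
    unfold pvDictStep at ih ⊢
    simp only [List.foldl_cons, List.findSome?_cons]
    by_cases hc : c.2 = k
    · subst hc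
      by_cases hD : D.contains c.2
      · rw [if_neg (by simp [hD])]
        rw [ih]
        obtain ⟨v, hv⟩ : ∃ v, D.get? c.2 = some v := by
          have hcv := PySem.Dict.contains_eq_isSome_get? D c.2
          rw [hD] at hcv
          exact Option.isSome_iff_exists.mp hcv.symm
        rw [hv]
      · rw [if_pos ⟨hk, hD⟩]
        rw [ih]
        have hnone : D.get? c.2 = none :=
          (PySem.Dict.get?_eq_none_iff_contains D c.2).mpr (by simpa using hD)
        rw [PySem.Dict.get?_insert_self, hnone]
        simp
    · have hrw : (if c.2 ∈ "0123456789".toList ∧ ¬ D.contains c.2 then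
            D.insert c.2 (c.1, row) else D).get? k = D.get? k := by
        split_ifs with h
        · exact PySem.Dict.get?_insert_of_ne D _ (fun h' => hc h'.symm)
        · rfl
      rw [ih, hrw, if_neg hc]

theorem pvGetOuter (l : List (Int × String)) (D : PySem.Dict Char (Int × Int))
    (k : Char) (hk : k ∈ "0123456789".toList) :
    (l.foldl (fun D rl => pvDictStep rl.1 D (PySem.List.enumerate rl.2.toList 0)) D).get? k
      = (match D.get? k with
         | some v => some v
         | none => l.findSome? (fun rl =>
             (PySem.List.enumerate rl.2.toList 0).findSome?
               (fun cc => if cc.2 = k then some (cc.1, rl.1) else none))) := by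
  induction l generalizing D with
  | nil =>
    simp only [List.foldl_nil, List.findSome?_nil]
    cases D.get? k <;> rfl
  | cons rl t ih =>
    simp only [List.foldl_cons, List.findSome?_cons]
    rw [ih _, pvGetStep _ _ _ _ hk]
    cases D.get? k with
    | some v => rfl
    | none =>
      simp only
      cases (PySem.List.enumerate rl.2.toList 0).findSome?
        (fun cc => if cc.2 = k then some (cc.1, rl.1) else none) <;> rfl

theorem pvPosB (L : List String) (k : Char) (hk : k ∈ "0123456789".toList) :
    ((PySem.List.enumerate L 0).foldl
        (fun D rl => pvDictStep rl.1 D (PySem.List.enumerate rl.2.toList 0))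
        PySem.Dict.empty).get? k
      = pvPos k L := by
  rw [pvGetOuter _ _ _ hk]
  have he : (PySem.Dict.empty : PySem.Dict Char (Int × Int)).get? k = none := by
    simp [PySem.Dict.get?_empty]
  rw [he]
  show (PySem.List.enumerate L 0).findSome? _ = _
  rw [pvFindSome_enumerate (fun r line =>
    (PySem.List.enumerate line.toList 0).findSome? (fun cc => if cc.2 = k then some (cc.1, r) else none)) L 0]
  unfold pvPos
  apply pvFindIdx_congr
  intro line _ r
  rw [pvFindSome_enumerate (fun c ch => if ch = k then some (c, r) else none) line.toList 0]

-- the cleared cell: A's set-membership test on singleton strings = B's char test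
theorem pvClearCell (ch : Char) :
    (if PySem.Set.contains
        (PySem.Set.ofList (".0123456789".toList.map (fun c => String.ofList [c])))
        (String.ofList [ch]) then (" " : String) else String.ofList [ch])
      = (if ch ∈ ".0123456789".toList then " " else String.ofList [ch]) := by
  have hiff : PySem.Set.contains
      (PySem.Set.ofList (".0123456789".toList.map (fun c => String.ofList [c])))
      (String.ofList [ch]) = true ↔ ch ∈ ".0123456789".toList := by
    simp [PySem.Set.contains, PySem.Set.mem_ofList, String.ext_iff]
  by_cases h : ch ∈ ".0123456789".toList
  · rw [if_pos (hiff.mpr h), if_pos h]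
  · rw [if_neg (fun hc => h (hiff.mp hc)), if_neg h]

-- ===== VERDICT (by name: the statement is the Claim_ definition above) =====
theorem parse_problem_spec : Claim_equal_parse_problem := by
  intro problem _ hpre
  obtain ⟨hne, hrect⟩ := hpre
  unfold Spec_parse_problem
  simp only [parse_problem, parse_problem_alt, parse_board]
  set L := PySem.Str.splitlines problem with hLdef
  rw [pvOuterSplit (PySem.List.enumerate L 0) PySem.Dict.empty []]
  simp only [List.nil_append, Prod.mk.injEq]
  refine ⟨?_, ?_, ?_⟩
  · -- start
    rw [pvPosA L "0" '0' rfl hne hrect, pvPosB L '0' (by decide)]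
  · -- pois
    have e1 : pos_for_value (PySem.Int.toStr 1)
        (L.map (fun line => line.toList.map (fun c => String.ofList [c]))) = pvPos '1' L :=
      pvPosA L _ '1' rfl hne hrect
    have e2 : pos_for_value (PySem.Int.toStr 2)
        (L.map (fun line => line.toList.map (fun c => String.ofList [c]))) = pvPos '2' L :=
      pvPosA L _ '2' rfl hne hrect
    have e3 : pos_for_value (PySem.Int.toStr 3)
        (L.map (fun line => line.toList.map (fun c => String.ofList [c]))) = pvPos '3' L :=
      pvPosA L _ '3' rfl hne hrect
    have e4 : pos_for_value (PySem.Int.toStr 4)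
        (L.map (fun line => line.toList.map (fun c => String.ofList [c]))) = pvPos '4' L :=
      pvPosA L _ '4' rfl hne hrect
    have e5 : pos_for_value (PySem.Int.toStr 5)
        (L.map (fun line => line.toList.map (fun c => String.ofList [c]))) = pvPos '5' L :=
      pvPosA L _ '5' rfl hne hrect
    have e6 : pos_for_value (PySem.Int.toStr 6)
        (L.map (fun line => line.toList.map (fun c => String.ofList [c]))) = pvPos '6' L :=
      pvPosA L _ '6' rfl hne hrect
    have e7 : pos_for_value (PySem.Int.toStr 7)
        (L.map (fun line => line.toList.map (fun c => String.ofList [c]))) = pvPos '7' L :=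
      pvPosA L _ '7' rfl hne hrect
    have e8 : pos_for_value (PySem.Int.toStr 8)
        (L.map (fun line => line.toList.map (fun c => String.ofList [c]))) = pvPos '8' L :=
      pvPosA L _ '8' rfl hne hrect
    have e9 : pos_for_value (PySem.Int.toStr 9)
        (L.map (fun line => line.toList.map (fun c => String.ofList [c]))) = pvPos '9' L :=
      pvPosA L _ '9' rfl hne hrect
    rw [show PySem.List.pyRange 1 10 1 = [1, 2, 3, 4, 5, 6, 7, 8, 9] from by decide]
    rw [show ("123456789".toList) = ['1', '2', '3', '4', '5', '6', '7', '8', '9'] from rfl]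
    simp only [List.foldl_cons, List.foldl_nil, e1, e2, e3, e4, e5, e6, e7, e8, e9]
    rw [pvPosB L '1' (by decide), pvPosB L '2' (by decide), pvPosB L '3' (by decide),
        pvPosB L '4' (by decide), pvPosB L '5' (by decide), pvPosB L '6' (by decide),
        pvPosB L '7' (by decide), pvPosB L '8' (by decide), pvPosB L '9' (by decide)]
  · -- cleared board
    rw [pvMapEnumRows]
    simp only [List.map_map]
    apply List.map_congr_left
    intro line _
    simp only [Function.comp_apply, List.map_map]
    apply List.map_congr_left
    intro ch _
    exact pvClearCell ch
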